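-- pv_equiv track=rewrite | github.com/Luda-costa/safe_browse | safe_browse/PhisingAI/main.py | explicar_textualmente
-- ===== SOURCE A (Python) =====
-- def explicar_textualmente(url, pesos_lime):
--     partes = []
--     for nome, peso in pesos_lime:
--         if "palavras_sus" in nome:
--             desc = "A URL contém palavras consideradas suspeitas"
--         elif "tem_https" in nome:
--             desc = "A URL não usa HTTPS"
--         elif "ip" in nome:
--             desc = "O domínio parece um endereço IP"
--         elif "len_url" in nome:
--             desc = "A URL é muito longa"
--         elif "len_dominio" in nome:
--             desc = "O domínio é muito longo"
--         elif "len_path" in nome: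
--             desc = "O caminho da URL é muito longo"
--         elif "num_ponto" in nome:
--             desc = "a URL tem muitos pontos"
--         elif "num_hifen" in nome:
--             desc = "a URL tem muitos hífens"
--         elif "num_barra" in nome:
--             desc = "a URL tem muitas barras"
--         else:
--             desc = f"feature {nome}"
--
--         partes.append(f"{desc}. ")
--
--         if len(partes) >= 3:
--             break
--
--     if not partes:
--         return "Não há contribuições fortes detectadas para explicar esta decisão."
--
--     return " ".join(partes)
-- ===== SOURCE B (Python) =====
-- RULES = [
--     ("palavras_sus", "A URL contém palavras consideradas suspeitas"),
--     ("tem_https", "A URL não usa HTTPS"),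
--     ("ip", "O domínio parece um endereço IP"),
--     ("len_url", "A URL é muito longa"),
--     ("len_dominio", "O domínio é muito longo"),
--     ("len_path", "O caminho da URL é muito longo"),
--     ("num_ponto", "a URL tem muitos pontos"),
--     ("num_hifen", "a URL tem muitos hífens"),
--     ("num_barra", "a URL tem muitas barras"),
-- ]
--
--
-- def _descrever(nome, regras):
--     # recursive first-match scan of the rule list
--     if not regras:
--         return "feature " + nome
--     s, d = regras[0]
--     return d if s in nome else _descrever(nome, regras[1:])
--
--
-- def _montar(itens, restantes):
--     # recursively builds the sentence string directly (no list, no join)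
--     texto = _descrever(itens[0][0], RULES) + ". "
--     if restantes == 1 or len(itens) == 1:
--         return texto
--     return texto + " " + _montar(itens[1:], restantes - 1)
--
--
-- def explicar_textualmente(url, pesos_lime):
--     if not pesos_lime:
--         return "Não há contribuições fortes detectadas para explicar esta decisão."
--     return _montar(pesos_lime, 3)
-- ===== Notes on version B (the rewrite author's own statement) =====
-- stated objective: alternative
-- what changed: Replaces A's imperative loop with a list accumulator, break-at-3 and final join by two recursive functions that scan the rule list and build the result string directly by concatenation, with no intermediate list at all.
import Mathlib
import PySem

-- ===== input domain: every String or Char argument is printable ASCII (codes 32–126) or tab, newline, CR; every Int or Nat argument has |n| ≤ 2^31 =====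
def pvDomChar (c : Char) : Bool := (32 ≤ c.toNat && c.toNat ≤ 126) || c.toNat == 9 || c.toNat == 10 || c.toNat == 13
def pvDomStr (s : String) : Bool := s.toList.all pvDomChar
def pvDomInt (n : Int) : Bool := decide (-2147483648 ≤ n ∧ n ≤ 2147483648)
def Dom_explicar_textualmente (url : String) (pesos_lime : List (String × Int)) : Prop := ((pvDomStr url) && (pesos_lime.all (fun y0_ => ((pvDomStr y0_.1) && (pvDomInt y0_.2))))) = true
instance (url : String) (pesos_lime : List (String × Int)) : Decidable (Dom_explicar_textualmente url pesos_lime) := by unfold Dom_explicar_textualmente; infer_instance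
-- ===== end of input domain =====

-- B replaces A's loop + list accumulator + break + join by two recursive functions that
-- scan a rule list and build the result string directly by concatenation (objective: alternative; same cost).

-- ===== PORT A =====
-- the for-loop of A: accumulator 'partes', break once len(partes) >= 3
def pvLoopA : List (String × Int) → List String → List String
  | [], partes => partes
  | (nome, _) :: rest, partes =>
    let desc :=
      if PySem.Str.isIn "palavras_sus" nome then "A URL contém palavras consideradas suspeitas"
      else if PySem.Str.isIn "tem_https" nome then "A URL não usa HTTPS"
      else if PySem.Str.isIn "ip" nome then "O domínio parece um endereço IP"
      else if PySem.Str.isIn "len_url" nome then "A URL é muito longa"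
      else if PySem.Str.isIn "len_dominio" nome then "O domínio é muito longo"
      else if PySem.Str.isIn "len_path" nome then "O caminho da URL é muito longo"
      else if PySem.Str.isIn "num_ponto" nome then "a URL tem muitos pontos"
      else if PySem.Str.isIn "num_hifen" nome then "a URL tem muitos hífens"
      else if PySem.Str.isIn "num_barra" nome then "a URL tem muitas barras"
      else "feature " ++ nome
    let partes' := partes ++ [desc ++ ". "]
    if 3 ≤ partes'.length then partes' else pvLoopA rest partes'

def explicar_textualmente (url : String) (pesos_lime : List (String × Int)) : String :=
  let partes := pvLoopA pesos_lime []
  if partes = [] then "Não há contribuições fortes detectadas para explicar esta decisão."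
  else PySem.Str.join " " partes

-- ===== PORT B =====
def pvRules : List (String × String) :=
  [("palavras_sus", "A URL contém palavras consideradas suspeitas"),
   ("tem_https", "A URL não usa HTTPS"),
   ("ip", "O domínio parece um endereço IP"),
   ("len_url", "A URL é muito longa"),
   ("len_dominio", "O domínio é muito longo"),
   ("len_path", "O caminho da URL é muito longo"),
   ("num_ponto", "a URL tem muitos pontos"),
   ("num_hifen", "a URL tem muitos hífens"),
   ("num_barra", "a URL tem muitas barras")]

-- _descrever: recursive first-match scan of the rule list
def pvDescrever (nome : String) : List (String × String) → String
  | [] => "feature " ++ nome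
  | (s, d) :: rs => if PySem.Str.isIn s nome then d else pvDescrever nome rs

-- _montar: recursively builds the sentence string directly (called with itens ≠ [];
-- the [] branch is the total completion of the structural recursion, never reached)
def pvMontar : List (String × Int) → Nat → String
  | [], _ => ""
  | (nome, _) :: tl, restantes =>
    let texto := pvDescrever nome pvRules ++ ". "
    if restantes = 1 ∨ tl = [] then texto
    else texto ++ " " ++ pvMontar tl (restantes - 1)

def explicar_textualmente_alt (url : String) (pesos_lime : List (String × Int)) : String :=
  match pesos_lime with
  | [] => "Não há contribuições fortes detectadas para explicar esta decisão."
  | _ => pvMontar pesos_lime 3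

-- ===== PRECONDITION & SPEC =====
def Spec_explicar_textualmente (url : String) (pesos_lime : List (String × Int)) (out : String) : Prop := out = explicar_textualmente_alt url pesos_lime
instance (url : String) (pesos_lime : List (String × Int)) (out : String) : Decidable (Spec_explicar_textualmente url pesos_lime out) := by unfold Spec_explicar_textualmente; infer_instance

-- ===== CLAIM (what is proved, stated in full; the proofs are below) =====
def Claim_equal_explicar_textualmente : Prop := ∀ (url : String) (pesos_lime : List (String × Int)), Dom_explicar_textualmente url pesos_lime → Spec_explicar_textualmente url pesos_lime (explicar_textualmente url pesos_lime)

-- ===== LEMMAS AND PROOFS =====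
-- A's loop result characterised as the first (3 - |acc|) descriptions
theorem pvLoopA_eq (xs : List (String × Int)) : ∀ (acc : List String), acc.length < 3 →
    pvLoopA xs acc = acc ++ (xs.take (3 - acc.length)).map (fun p => pvDescrever p.1 pvRules ++ ". ") := by
  induction xs with
  | nil => intro acc _; simp [pvLoopA]
  | cons hd tl ih =>
    intro acc hacc
    obtain ⟨nome, peso⟩ := hd
    have hdesc : (if PySem.Str.isIn "palavras_sus" nome then "A URL contém palavras consideradas suspeitas"
      else if PySem.Str.isIn "tem_https" nome then "A URL não usa HTTPS"
      else if PySem.Str.isIn "ip" nome then "O domínio parece um endereço IP"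
      else if PySem.Str.isIn "len_url" nome then "A URL é muito longa"
      else if PySem.Str.isIn "len_dominio" nome then "O domínio é muito longo"
      else if PySem.Str.isIn "len_path" nome then "O caminho da URL é muito longo"
      else if PySem.Str.isIn "num_ponto" nome then "a URL tem muitos pontos"
      else if PySem.Str.isIn "num_hifen" nome then "a URL tem muitos hífens"
      else if PySem.Str.isIn "num_barra" nome then "a URL tem muitas barras"
      else "feature " ++ nome) = pvDescrever nome pvRules := by
      simp only [pvRules, pvDescrever]
    simp only [pvLoopA, hdesc]
    by_cases h3 : 3 ≤ (acc ++ [pvDescrever nome pvRules ++ ". "]).length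
    · have : acc.length = 2 := by simp at h3; omega
      simp [this, List.take]
    · have hlen : (acc ++ [pvDescrever nome pvRules ++ ". "]).length < 3 := by omega
      rw [if_neg h3, ih _ hlen]
      have h2 : (3 - (acc ++ [pvDescrever nome pvRules ++ ". "]).length) = 3 - (acc.length + 1) := by simp
      have htake : (((nome, peso) :: tl).take (3 - acc.length))
          = (nome, peso) :: tl.take (3 - (acc.length + 1)) := by
        have hs : 3 - acc.length = (3 - (acc.length + 1)) + 1 := by omega
        rw [hs, List.take_succ_cons]
      rw [h2, htake]
      simp

-- B's recursion equals ' '.join of the first k descriptions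
theorem pvMontar_eq (xs : List (String × Int)) : ∀ (k : Nat), 1 ≤ k → xs ≠ [] →
    pvMontar xs k = PySem.Str.join " " ((xs.take k).map (fun p => pvDescrever p.1 pvRules ++ ". ")) := by
  induction xs with
  | nil => intro k _ h; exact absurd rfl h
  | cons hd tl ih =>
    intro k hk _
    obtain ⟨nome, peso⟩ := hd
    obtain ⟨k', rfl⟩ : ∃ k', k = k' + 1 := ⟨k - 1, by omega⟩
    simp only [pvMontar, List.take_succ_cons, List.map_cons]
    by_cases hstop : k' + 1 = 1 ∨ tl = []
    · rw [if_pos hstop]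
      rcases hstop with h1 | h2
      · have : k' = 0 := by omega
        subst this
        simp [PySem.Str.join, PySem.Chars.join_singleton]
      · subst h2
        simp [PySem.Str.join, PySem.Chars.join_singleton]
    · rw [if_neg hstop]
      push_neg at hstop
      obtain ⟨h1, h2⟩ := hstop
      have hk' : 1 ≤ k' := by omega
      rw [show k' + 1 - 1 = k' from rfl, ih k' hk' h2]
      obtain ⟨q, qs, hq⟩ : ∃ q qs, tl.take k' = q :: qs := by
        cases htl : tl.take k' with
        | nil =>
          exfalso
          cases tl with
          | nil => exact h2 rfl
          | cons a as => rw [show k' = (k' - 1) + 1 from by omega, List.take_succ_cons] at htl; simp at htl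
        | cons q qs => exact ⟨q, qs, rfl⟩
      rw [hq]
      simp only [List.map_cons, PySem.Str.join]
      rw [show (" " : String).toList = [' '] from rfl]
      rw [PySem.Chars.join_cons_cons]
      have hofL : ∀ (a b : List Char), String.ofList (a ++ b) = String.ofList a ++ String.ofList b := by
        intro a b
        apply String.toList_injective
        simp
      rw [hofL, hofL]
      simp

-- ===== VERDICT (by name: the statement is the Claim_ definition above) =====
theorem explicar_textualmente_spec : Claim_equal_explicar_textualmente := by
  intro url pesos_lime _
  show _ = _
  unfold explicar_textualmente explicar_textualmente_alt
  rw [pvLoopA_eq pesos_lime [] (by simp)]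
  cases pesos_lime with
  | nil => simp
  | cons hd tl =>
    rw [pvMontar_eq (hd :: tl) 3 (by omega) (by simp)]
    simp
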